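-- pv_equiv track=rewrite | github.com/noahzweben/DanceMuse | MusicFunctions.py | enforceOctave
-- ===== SOURCE A (Python) =====
-- def enforceOctave(notes,rangeVal):
-- 	"""Moves the pitches in list, notes, into an octave
-- 	defined by rangeVal"""
-- 	notesIn = notes[:]
-- 	for i in range(len(notesIn)):
-- 		while (notesIn[i]<min(rangeVal) or notesIn[i]>max(rangeVal)):
-- 			if notesIn[i] < min(rangeVal):
-- 				notesIn[i]=notesIn[i]+12
-- 			else:
-- 				notesIn[i]=notesIn[i]-12
-- 	notesIn.sort()
-- 	return notesIn
-- ===== SOURCE B (Python) =====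
-- def enforceOctave(notes, rangeVal):
--     """Moves the pitches in list, notes, into an octave
--     defined by rangeVal (lo/hi computed once, each note placed in O(1)
--     by modular arithmetic instead of a +/-12 stepping loop)."""
--     lo = min(rangeVal)
--     hi = max(rangeVal)
--     out = []
--     for x in notes:
--         if x < lo:
--             x = lo + (x - lo) % 12
--         elif x > hi:
--             x = hi - (hi - x) % 12
--         out.append(x)
--     out.sort()
--     return out
-- ===== Notes on version B (the rewrite author's own statement) =====
-- stated objective: faster
-- what changed: B computes min/max of rangeVal once and places each note directly with one modular-arithmetic step ((x-lo)%12 from below, (hi-x)%12 from above) instead of A's while loop that shifts by 12 repeatedly and recomputes min(rangeVal)/max(rangeVal) on every test; Pre_ excludes empty rangeVal (ValueError) and notes A's while loop never lands in range on (non-termination).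
-- outside the precondition, e.g. on enforceOctave([], []): A returns [], B raises ValueError
import Mathlib
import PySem

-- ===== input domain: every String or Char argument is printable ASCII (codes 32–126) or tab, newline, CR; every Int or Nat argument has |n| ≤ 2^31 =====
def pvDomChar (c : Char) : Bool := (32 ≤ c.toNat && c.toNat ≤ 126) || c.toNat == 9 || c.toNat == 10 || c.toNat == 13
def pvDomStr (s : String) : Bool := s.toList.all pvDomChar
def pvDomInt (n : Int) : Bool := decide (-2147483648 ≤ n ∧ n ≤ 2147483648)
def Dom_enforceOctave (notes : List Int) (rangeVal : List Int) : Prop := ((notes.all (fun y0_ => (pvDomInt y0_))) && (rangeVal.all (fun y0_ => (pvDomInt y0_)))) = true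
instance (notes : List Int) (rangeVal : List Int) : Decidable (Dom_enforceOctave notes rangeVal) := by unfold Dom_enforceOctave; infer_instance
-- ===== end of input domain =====

-- B computes min/max once and places each note by one modular-arithmetic step
-- instead of A's repeated ±12 stepping loop that recomputes min/max each test.

-- ===== PORT A =====
-- the while loop of A, with fuel only as a totality device (Pre_ guarantees it suffices)
def pvAdjustA (fuel : Nat) (x lo hi : Int) : Int :=
  match fuel with
  | 0 => x
  | f + 1 =>
    if x < lo then pvAdjustA f (x + 12) lo hi
    else if x > hi then pvAdjustA f (x - 12) lo hi
    else x

def enforceOctave (notes : List Int) (rangeVal : List Int) : List Int :=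
  match PySem.List.min? rangeVal (fun y => y), PySem.List.max? rangeVal (fun y => y) with
  | some lo, some hi =>
      -- the index loop rewrites each position in place, then .sort()
      PySem.List.sorted
        (notes.map (fun x => pvAdjustA ((x - lo).natAbs + (x - hi).natAbs + 1) x lo hi))
        (fun y => y) false
  | _, _ => []  -- min()/max() of an empty list raise in Python; excluded by Pre_

-- ===== PORT B =====
def pvPlace (x lo hi : Int) : Int :=
  if x < lo then lo + (x - lo) % 12        -- Int % = emod, exact for the positive modulus 12
  else if x > hi then hi - (hi - x) % 12
  else x

def enforceOctave_alt (notes : List Int) (rangeVal : List Int) : List Int :=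
  match PySem.List.min? rangeVal (fun y => y) with
  | none => []  -- excluded by Pre_
  | some lo =>
    match PySem.List.max? rangeVal (fun y => y) with
    | none => []  -- excluded by Pre_
    | some hi => PySem.List.sorted (notes.map (fun x => pvPlace x lo hi)) (fun y => y) false

-- ===== PRECONDITION & SPEC =====
-- Pre_ excludes rangeVal = [] — min()/max() raise ValueError there (A only returns on it when notes is also empty, B raises even then) —
-- and notes containing a pitch no ±12 shift can
-- land inside [min rangeVal, max rangeVal] (A's while loop never terminates).
def Pre_enforceOctave (notes : List Int) (rangeVal : List Int) : Prop :=
  rangeVal ≠ [] ∧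
  ∀ x ∈ notes,
    (x < ((PySem.List.min? rangeVal (fun y => y)).getD 0) →
       ((PySem.List.min? rangeVal (fun y => y)).getD 0) +
         (x - ((PySem.List.min? rangeVal (fun y => y)).getD 0)) % 12
         ≤ ((PySem.List.max? rangeVal (fun y => y)).getD 0)) ∧
    (((PySem.List.max? rangeVal (fun y => y)).getD 0) < x →
       ((PySem.List.min? rangeVal (fun y => y)).getD 0) ≤
         ((PySem.List.max? rangeVal (fun y => y)).getD 0) -
           (((PySem.List.max? rangeVal (fun y => y)).getD 0) - x) % 12)
instance (notes : List Int) (rangeVal : List Int) : Decidable (Pre_enforceOctave notes rangeVal) := by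
  unfold Pre_enforceOctave; infer_instance

def pvWitness_enforceOctave : List Int × List Int := ([73, 48, 62, -3], [60, 71])

def Spec_enforceOctave (notes : List Int) (rangeVal : List Int) (out : List Int) : Prop := out = enforceOctave_alt notes rangeVal
instance (notes : List Int) (rangeVal : List Int) (out : List Int) : Decidable (Spec_enforceOctave notes rangeVal out) := by unfold Spec_enforceOctave; infer_instance

-- ===== CLAIM (what is proved, stated in full; the proofs are below) =====
def Claim_equal_enforceOctave : Prop := ∀ (notes : List Int) (rangeVal : List Int), Dom_enforceOctave notes rangeVal → Pre_enforceOctave notes rangeVal → Spec_enforceOctave notes rangeVal (enforceOctave notes rangeVal)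

-- ===== LEMMAS AND PROOFS =====

-- a note already inside the octave is returned untouched, whatever the fuel
theorem pvAdjustA_in (f : Nat) (x lo hi : Int) (h1 : ¬ x < lo) (h2 : ¬ x > hi) :
    pvAdjustA f x lo hi = x := by
  cases f <;> simp [pvAdjustA, h1, h2]

-- climbing from below stops at lo + (x - lo) % 12 once the fuel covers the distance
theorem pvAdjustA_up (lo hi : Int) :
    ∀ (f : Nat) (x : Int), x < lo → lo + (x - lo) % 12 ≤ hi →
      (lo - x).natAbs ≤ 12 * f → pvAdjustA f x lo hi = lo + (x - lo) % 12 := by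
  intro f
  induction f with
  | zero => intro x hx _ hfuel; omega
  | succ f ih =>
    intro x hx hin hfuel
    have hmod : (x + 12 - lo) % 12 = (x - lo) % 12 := by omega
    by_cases hlt : x + 12 < lo
    · have := ih (x + 12) hlt (by omega) (by omega)
      simp only [pvAdjustA, if_pos hx]
      omega
    · have heq : x + 12 = lo + (x - lo) % 12 := by omega
      simp only [pvAdjustA, if_pos hx]
      rw [pvAdjustA_in f (x + 12) lo hi hlt (by omega)]
      omega

-- descending from above stops at hi - (hi - x) % 12
theorem pvAdjustA_down (lo hi : Int) :
    ∀ (f : Nat) (x : Int), hi < x → lo ≤ hi - (hi - x) % 12 →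
      (x - hi).natAbs ≤ 12 * f → pvAdjustA f x lo hi = hi - (hi - x) % 12 := by
  intro f
  induction f with
  | zero => intro x hx _ hfuel; omega
  | succ f ih =>
    intro x hx hin hfuel
    have hmod : (hi - (x - 12)) % 12 = (hi - x) % 12 := by omega
    by_cases hgt : hi < x - 12
    · have := ih (x - 12) hgt (by omega) (by omega)
      simp only [pvAdjustA, if_neg (by omega : ¬ x < lo), if_pos hx]
      omega
    · have heq : x - 12 = hi - (hi - x) % 12 := by omega
      simp only [pvAdjustA, if_neg (by omega : ¬ x < lo), if_pos hx]
      rw [pvAdjustA_in f (x - 12) lo hi (by omega) hgt]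
      omega

-- per note: A's stepping loop equals B's one modular step, under the landing condition
theorem pvAdjustA_eq_place (x lo hi : Int) (hlohi : lo ≤ hi)
    (h1 : x < lo → lo + (x - lo) % 12 ≤ hi)
    (h2 : hi < x → lo ≤ hi - (hi - x) % 12) :
    pvAdjustA ((x - lo).natAbs + (x - hi).natAbs + 1) x lo hi = pvPlace x lo hi := by
  unfold pvPlace
  by_cases hx : x < lo
  · rw [if_pos hx, pvAdjustA_up lo hi _ x hx (h1 hx) (by omega)]
  · by_cases hy : x > hi
    · rw [if_neg hx, if_pos hy, pvAdjustA_down lo hi _ x hy (h2 hy) (by omega)]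
    · rw [if_neg hx, if_neg hy, pvAdjustA_in _ x lo hi hx hy]

-- ===== VERDICT (by name: the statement is the Claim_ definition above) =====
theorem enforceOctave_spec : Claim_equal_enforceOctave := by
  intro notes rangeVal _ hpre
  obtain ⟨hne, hnotes⟩ := hpre
  unfold Spec_enforceOctave enforceOctave enforceOctave_alt
  obtain ⟨lo, hlo⟩ : ∃ lo, PySem.List.min? rangeVal (fun y => y) = some lo := by
    cases h : PySem.List.min? rangeVal (fun y => y) with
    | none => exact absurd ((PySem.List.min?_eq_none_iff rangeVal (fun y => y)).mp h) hne
    | some lo => exact ⟨lo, rfl⟩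
  obtain ⟨hi, hhi⟩ : ∃ hi, PySem.List.max? rangeVal (fun y => y) = some hi := by
    cases h : PySem.List.max? rangeVal (fun y => y) with
    | none => exact absurd ((PySem.List.max?_eq_none_iff rangeVal (fun y => y)).mp h) hne
    | some hi => exact ⟨hi, rfl⟩
  have hlohi : lo ≤ hi :=
    PySem.List.max?_isMax hhi lo (PySem.List.min?_mem hlo)
  rw [hlo, hhi]
  dsimp only
  congr 1
  apply List.map_congr_left
  intro x hx
  have h := hnotes x hx
  rw [hlo, hhi] at h
  simp only [Option.getD_some] at h
  exact pvAdjustA_eq_place x lo hi hlohi h.1 h.2
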